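-- pv_equiv track=rewrite | github.com/unoof/code-ptit | DSA_python/DSA01019 HAHAHA.py | check
-- ===== SOURCE A (Python) =====
-- def check(A, n):
--     if (A[0] == 'A') or (A[n-1] == 'H'):
--         return False
--
--     alr_H = True
--
--     for i in range(1, n-1):
--         if A[i] == 'H':
--             if alr_H:
--                 return False
--             alr_H = True
--         else:
--             alr_H = False
--     return True
-- ===== SOURCE B (Python) =====
-- def check(A, n):
--     if A[0] == 'A' or A[n-1] == 'H':
--         return False
--     # interior positions of the first n characters are 1..n-2; empty when n <= 1
--     interior = A[1:n-1] if n > 1 else ''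
--     return 'HH' not in 'H' + interior
-- ===== Notes on version B (the rewrite author's own statement) =====
-- stated objective: simpler
-- what changed: Replaced the boolean alr_H state machine with early returns by materializing the interior A[1:n-1], prefixing 'H' (which models the initial alr_H=True), and doing one substring test 'HH' not in it.
import Mathlib
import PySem

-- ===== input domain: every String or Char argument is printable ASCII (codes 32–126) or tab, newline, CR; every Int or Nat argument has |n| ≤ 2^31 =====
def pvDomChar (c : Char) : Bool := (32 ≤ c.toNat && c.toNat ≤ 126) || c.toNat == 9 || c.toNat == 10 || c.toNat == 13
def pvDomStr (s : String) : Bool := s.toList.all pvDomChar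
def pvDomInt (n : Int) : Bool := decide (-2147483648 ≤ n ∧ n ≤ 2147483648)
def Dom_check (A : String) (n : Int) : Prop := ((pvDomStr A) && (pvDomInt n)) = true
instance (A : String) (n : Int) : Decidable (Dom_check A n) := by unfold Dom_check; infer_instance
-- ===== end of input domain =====

-- B replaces A's boolean state-machine loop by one substring test on 'H' + A[1:n-1] (objective: simpler).

-- ===== PORT A =====
-- the for-loop over range(1, n-1) with the alr_H flag and early return False
def checkGo (cs : List Char) (idxs : List Int) (alrH : Bool) : Bool :=
  match idxs with
  | [] => true
  | i :: rest =>
    if PySem.List.pyGetD cs i ' ' = 'H' then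
      if alrH then false else checkGo cs rest true
    else checkGo cs rest false

def check (A : String) (n : Int) : Bool :=
  if PySem.List.pyGetD A.toList 0 ' ' = 'A' then false          -- A[0] == 'A' (short-circuit or)
  else if PySem.List.pyGetD A.toList (n-1) ' ' = 'H' then false -- A[n-1] == 'H'
  else checkGo A.toList (PySem.List.pyRange 1 (n-1) 1) true

-- ===== PORT B =====
def check_alt (A : String) (n : Int) : Bool :=
  if PySem.List.pyGetD A.toList 0 ' ' = 'A' then false
  else if PySem.List.pyGetD A.toList (n-1) ' ' = 'H' then false
  else
    -- interior = A[1:n-1] if n > 1 else ''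
    let interior := if 1 < n then PySem.List.slice A.toList (some 1) (some (n-1)) else []
    -- return 'HH' not in 'H' + interior
    !(PySem.Chars.isIn ['H', 'H'] ('H' :: interior))

-- ===== PRECONDITION & SPEC =====
-- Pre_ is exactly where the Python A returns: A nonempty, and (by short-circuit) either A[0] == 'A'
-- or n-1 a valid Python index into A (the loop indices 1..n-2 are then in range too).
def Pre_check (A : String) (n : Int) : Prop :=
  A.toList ≠ [] ∧
    (A.toList[0]? = some 'A' ∨ (-(A.toList.length : Int) ≤ n - 1 ∧ n - 1 < A.toList.length))
instance (A : String) (n : Int) : Decidable (Pre_check A n) := by unfold Pre_check; infer_instance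

def pvWitness_check : String × Int := ("BAB", 3)

def Spec_check (A : String) (n : Int) (out : Bool) : Prop := out = check_alt A n
instance (A : String) (n : Int) (out : Bool) : Decidable (Spec_check A n out) := by unfold Spec_check; infer_instance

-- ===== CLAIM (what is proved, stated in full; the proofs are below) =====
def Claim_equal_check : Prop := ∀ (A : String) (n : Int), Dom_check A n → Pre_check A n → Spec_check A n (check A n)

-- ===== LEMMAS AND PROOFS =====

-- abstract pair scan: true iff an 'H' follows a position whose flag/previous char is 'H'
def pairScan : Bool → List Char → Bool
  | _, [] => false
  | f, c :: t => (f && decide (c = 'H')) || pairScan (decide (c = 'H')) t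

def hasHH : List Char → Bool
  | a :: b :: t => (decide (a = 'H') && decide (b = 'H')) || hasHH (b :: t)
  | _ => false

theorem checkGo_eq_pairScan (cs : List Char) :
    ∀ (idxs : List Int) (f : Bool),
      checkGo cs idxs f = !(pairScan f (idxs.map (fun i => PySem.List.pyGetD cs i ' '))) := by
  intro idxs
  induction idxs with
  | nil => intro f; simp [checkGo, pairScan]
  | cons i rest ih =>
    intro f
    by_cases h : PySem.List.pyGetD cs i ' ' = 'H'
    · cases f <;> simp [checkGo, pairScan, h, ih]
    · simp [checkGo, pairScan, h, ih]

theorem hasHH_cons (l : List Char) : ∀ c, hasHH (c :: l) = pairScan (decide (c = 'H')) l := by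
  induction l with
  | nil => intro c; simp [hasHH, pairScan]
  | cons b t ih => intro c; simp [hasHH, pairScan, ih b]

theorem hasHH_iff_infix (l : List Char) : hasHH l = true ↔ ['H', 'H'] <:+: l := by
  induction l with
  | nil => simp [hasHH]
  | cons a t ih =>
    cases t with
    | nil =>
      simp only [hasHH]
      constructor
      · intro h; exact absurd h (by simp)
      · intro h; have := h.length_le; simp at this
    | cons b t' =>
      rw [show hasHH (a :: b :: t') = ((decide (a = 'H') && decide (b = 'H')) || hasHH (b :: t')) from rfl]
      rw [List.infix_cons_iff]
      constructor
      · intro h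
        rcases Bool.or_eq_true_iff.mp h with h | h
        · left
          simp only [Bool.and_eq_true, decide_eq_true_eq] at h
          simp [h.1, h.2, List.cons_prefix_cons]
        · right; exact ih.mp h
      · intro h
        rcases h with h | h
        · rcases List.cons_prefix_cons.mp h with ⟨rfl, h2⟩
          rcases List.cons_prefix_cons.mp h2 with ⟨rfl, _⟩
          simp
        · exact Bool.or_eq_true_iff.mpr (Or.inr (ih.mpr h))

theorem isIn_eq_hasHH (l : List Char) : PySem.Chars.isIn ['H', 'H'] l = hasHH l := by
  cases h : hasHH l
  · rw [PySem.Chars.isIn_eq_false_iff]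
    intro hinf
    rw [← hasHH_iff_infix] at hinf
    simp [h] at hinf
  · rw [PySem.Chars.isIn_iff_infix, ← hasHH_iff_infix]
    exact h

theorem map_get_pyRange (cs : List Char) :
    ∀ (k : Nat) (a b : Int), (b - a).toNat = k → 0 ≤ a → b ≤ cs.length →
      (PySem.List.pyRange a b 1).map (fun i => PySem.List.pyGetD cs i ' ')
        = (cs.drop a.toNat).take k := by
  intro k
  induction k with
  | zero =>
    intro a b hk _ _
    rw [PySem.List.pyRange_one]
    simp [hk]
  | succ k ih =>
    intro a b hk ha hb
    have hab : a < b := by omega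
    have haLen : a.toNat < cs.length := by omega
    rw [PySem.List.pyRange_one_cons hab, List.map_cons]
    rw [PySem.List.pyGetD_eq_getElem cs ' ' ha (by omega)]
    rw [ih (a + 1) b (by omega) (by omega) hb]
    rw [List.drop_eq_getElem_cons haLen, List.take_succ_cons]
    have : (a + 1).toNat = a.toNat + 1 := by omega
    rw [this]

theorem check_eq_alt (A : String) (n : Int) (hpre : Pre_check A n) :
    check A n = check_alt A n := by
  obtain ⟨hne, hor⟩ := hpre
  unfold check check_alt
  by_cases h0 : PySem.List.pyGetD A.toList 0 ' ' = 'A'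
  · simp [h0]
  · by_cases h1 : PySem.List.pyGetD A.toList (n-1) ' ' = 'H'
    · simp [h0, h1]
    · simp only [h0, h1, if_false]
      -- from Pre and h0 we get the index bound
      have hidx : -(A.toList.length : Int) ≤ n - 1 ∧ n - 1 < A.toList.length := by
        rcases hor with h | h
        · exfalso
          apply h0
          rw [PySem.List.pyGetD_zero]
          cases cs : A.toList with
          | nil => exact absurd cs hne
          | cons c t => rw [cs] at h; simp at h; simp [h]
        · exact h
      rw [checkGo_eq_pairScan, isIn_eq_hasHH, hasHH_cons]
      simp only [decide_true]
      by_cases hn : 1 < n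
      · rw [if_pos hn]
        rw [map_get_pyRange A.toList (n - 2).toNat 1 (n - 1) (by omega) (by omega) (by omega)]
        rw [PySem.List.slice_toNat _ (by omega) (by omega)]
        have h1n : (1 : Int).toNat = 1 := rfl
        have : (n - 1).toNat - (1 : Int).toNat = (n - 2).toNat := by omega
        rw [this]
      · rw [if_neg hn]
        have : PySem.List.pyRange 1 (n - 1) 1 = [] := by
          rw [PySem.List.pyRange_one]
          have : (n - 1 - 1).toNat = 0 := by omega
          simp [this]
        rw [this]
        simp [pairScan]

-- ===== VERDICT (by name: the statement is the Claim_ definition above) =====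
theorem check_spec : Claim_equal_check := by
  intro A n _ hpre
  unfold Spec_check
  exact check_eq_alt A n hpre
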